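-- pv_equiv track=rewrite | github.com/feynmanliang/bachbot | scripts/kerntools/concatenate_corpus.py | preprocess_kern
-- ===== SOURCE A (Python) =====
-- def preprocess_kern(lines, remove_metadata):
--     """Preprocesses kern file format, replacing measure numbers with '@' and optionally removing header.
--
--     :lines: List[String] : the lines of a kern file
--     :remove_metadata: Boolean : removes the header (e.g. tempo, key signature, time signature)
--     :returns: List[String] : the processed lines
--     """
--     REP='@\n' # delimiters between measures
--     out = []
--     found_first = False
--     for l in lines:
--         if l.startswith('='):
--             ## new measure, replace the measure with the @ sign, not part of humdrum
--             out.append(REP)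
--             found_first = True
--             continue
--         if not found_first:
--             ## keep going until we find the end of the header
--             continue
--         if l.startswith('!'):
--             ## ignore comments
--             continue
--         out.append(l)
--     return out
-- ===== SOURCE B (Python) =====
-- def _drop_header(lines):
--     for i, l in enumerate(lines):
--         if l.startswith('='):
--             return lines[i:]
--     return []
--
-- def preprocess_kern(lines, remove_metadata):
--     body = _drop_header(lines)
--     return [('@\n' if l.startswith('=') else l)
--             for l in body
--             if l.startswith('=') or not l.startswith('!')]
-- ===== Notes on version B (the rewrite author's own statement) =====
-- stated objective: simpler
-- what changed: Replaces the stateful found_first flag pass with a header-boundary stage (drop everything before the first '=' line) followed by a flagless filter+map over the suffix.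
import Mathlib
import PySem

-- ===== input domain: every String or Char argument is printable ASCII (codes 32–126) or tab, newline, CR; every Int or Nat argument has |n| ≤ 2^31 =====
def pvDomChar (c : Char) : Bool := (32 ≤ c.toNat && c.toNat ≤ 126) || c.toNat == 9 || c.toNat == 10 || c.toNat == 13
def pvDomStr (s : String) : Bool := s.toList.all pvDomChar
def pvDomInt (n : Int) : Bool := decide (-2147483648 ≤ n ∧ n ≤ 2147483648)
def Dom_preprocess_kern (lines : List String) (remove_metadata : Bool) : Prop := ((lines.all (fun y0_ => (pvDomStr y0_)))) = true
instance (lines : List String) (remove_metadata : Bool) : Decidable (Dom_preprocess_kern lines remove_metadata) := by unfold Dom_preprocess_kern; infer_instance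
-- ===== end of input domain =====

-- ===== PORT A =====
-- B replaces A's found_first flag with a boundary stage + flagless filter/map; return value only.
def pkGoA : List String → Bool → List String
  | [], _ => []
  | l :: ls, found_first =>
    if l.startsWith "=" then "@\n" :: pkGoA ls true
    else if !found_first then pkGoA ls found_first
    else if l.startsWith "!" then pkGoA ls found_first
    else l :: pkGoA ls found_first

def preprocess_kern (lines : List String) (remove_metadata : Bool) : List String :=
  pkGoA lines false

-- ===== PORT B =====
def pkDropHeader : List String → List String
  | [] => []
  | l :: ls => if l.startsWith "=" then l :: ls else pkDropHeader ls

def preprocess_kern_alt (lines : List String) (remove_metadata : Bool) : List String :=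
  ((pkDropHeader lines).filter
      (fun l => l.startsWith "=" || !l.startsWith "!")).map
    (fun l => if l.startsWith "=" then "@\n" else l)

-- ===== PRECONDITION & SPEC =====
def Spec_preprocess_kern (lines : List String) (remove_metadata : Bool) (out : List String) : Prop := out = preprocess_kern_alt lines remove_metadata
instance (lines : List String) (remove_metadata : Bool) (out : List String) : Decidable (Spec_preprocess_kern lines remove_metadata out) := by unfold Spec_preprocess_kern; infer_instance

-- ===== CLAIM (what is proved, stated in full; the proofs are below) =====
def Claim_equal_preprocess_kern : Prop := ∀ (lines : List String) (remove_metadata : Bool), Dom_preprocess_kern lines remove_metadata → Spec_preprocess_kern lines remove_metadata (preprocess_kern lines remove_metadata)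

-- ===== LEMMAS AND PROOFS =====

-- ===== VERDICT (by name: the statement is the Claim_ definition above) =====
theorem pkGoA_true (ls : List String) :
    pkGoA ls true =
      (ls.filter (fun l => l.startsWith "=" || !l.startsWith "!")).map
        (fun l => if l.startsWith "=" then "@\n" else l) := by
  induction ls with
  | nil => rfl
  | cons l ls ih =>
    simp only [pkGoA, List.filter, List.map]
    by_cases h1 : l.startsWith "="
    · simp [h1, ih]
    · by_cases h2 : l.startsWith "!" <;> simp [h1, h2, ih]

theorem pkGoA_false (ls : List String) :
    pkGoA ls false =
      ((pkDropHeader ls).filter (fun l => l.startsWith "=" || !l.startsWith "!")).map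
        (fun l => if l.startsWith "=" then "@\n" else l) := by
  induction ls with
  | nil => rfl
  | cons l ls ih =>
    simp only [pkGoA, pkDropHeader]
    by_cases h1 : l.startsWith "="
    · simp [h1, pkGoA_true]
    · simpa [h1] using ih

theorem preprocess_kern_spec : Claim_equal_preprocess_kern := by
  intro lines rm _
  unfold Spec_preprocess_kern preprocess_kern preprocess_kern_alt
  exact pkGoA_false lines
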